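-- pv_equiv track=rewrite | github.com/tipu0710/AdventOfCode | 2020/day4_2.py | eclValidate
-- ===== SOURCE A (Python) =====
-- def eclValidate(text):
--     find = False
--     ecl = ["amb", "blu", "brn", "gry", "grn", "hzl", "oth"]
--     for pp in ecl:
--         result = text.find(pp)
--         if result >= 0:
--             find = True
--             break
--     return find
-- ===== SOURCE B (Python) =====
-- def eclValidate(text):
--     codes = {"amb", "blu", "brn", "gry", "grn", "hzl", "oth"}
--     while len(text) >= 3:
--         if text[:3] in codes:
--             return True
--         text = text[1:]
--     return False
-- ===== Notes on version B (the rewrite author's own statement) =====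
-- stated objective: alternative
-- what changed: Instead of looping over the 7 codes and scanning the whole text for each with str.find, B slides a single 3-character window over the text, testing each window for membership in a set of the codes.
import Mathlib
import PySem

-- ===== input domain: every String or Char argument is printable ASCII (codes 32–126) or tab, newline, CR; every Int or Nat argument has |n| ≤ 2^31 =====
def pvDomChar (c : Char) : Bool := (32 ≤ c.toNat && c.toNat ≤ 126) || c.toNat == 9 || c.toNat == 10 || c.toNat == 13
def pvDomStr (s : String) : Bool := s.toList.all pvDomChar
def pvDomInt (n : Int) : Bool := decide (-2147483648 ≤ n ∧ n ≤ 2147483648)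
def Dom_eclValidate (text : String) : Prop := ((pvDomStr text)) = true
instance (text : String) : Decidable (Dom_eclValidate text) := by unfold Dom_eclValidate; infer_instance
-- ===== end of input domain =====

-- B scans the text once with a 3-character window against a set of the codes,
-- instead of A's loop over the 7 codes with a full str.find scan for each;
-- objective: alternative (same asymptotic cost, different traversal).

-- ===== PORT A =====
-- the 'for pp in ecl: … break' loop of A, as recursion over the code list
def eclLoop (text : String) : List String → Bool
  | [] => false
  | pp :: rest => if 0 ≤ PySem.Str.find text pp then true else eclLoop text rest

def eclValidate (text : String) : Bool :=
  eclLoop text ["amb", "blu", "brn", "gry", "grn", "hzl", "oth"]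

-- ===== PORT B =====
-- the 7 codes of Source B's set, as lists of characters
def eclCodes : List (List Char) :=
  [['a','m','b'], ['b','l','u'], ['b','r','n'], ['g','r','y'],
   ['g','r','n'], ['h','z','l'], ['o','t','h']]

-- Source B's while-loop: text[:3] is the 3-character window, text = text[1:] drops one character
def eclScan : List Char → Bool
  | [] => false
  | c1 :: tl =>
    match tl with
    | c2 :: c3 :: _ => if [c1, c2, c3] ∈ eclCodes then true else eclScan tl
    | _ => false

def eclValidate_alt (text : String) : Bool := eclScan text.toList

-- ===== PRECONDITION & SPEC =====
def Spec_eclValidate (text : String) (out : Bool) : Prop := out = eclValidate_alt text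
instance (text : String) (out : Bool) : Decidable (Spec_eclValidate text out) := by unfold Spec_eclValidate; infer_instance

-- ===== CLAIM (what is proved, stated in full; the proofs are below) =====
def Claim_equal_eclValidate : Prop := ∀ (text : String), Dom_eclValidate text → Spec_eclValidate text (eclValidate text)

-- ===== LEMMAS AND PROOFS =====

-- equation lemmas for eclScan (avoid over-unfolding by simp)
lemma eclScan_cons3 (c1 c2 c3 : Char) (r : List Char) :
    eclScan (c1 :: c2 :: c3 :: r) =
      if [c1, c2, c3] ∈ eclCodes then true else eclScan (c2 :: c3 :: r) := rfl

-- a 3-element list is a prefix of a::b::d::r exactly when it equals the first three characters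
lemma prefix3_iff (c : List Char) (hc : c.length = 3) (a b d : Char) (r : List Char) :
    c <+: (a :: b :: d :: r) ↔ c = [a, b, d] := by
  match c, hc with
  | [x, y, z], _ =>
    simp [List.cons_prefix_cons]

lemma not_infix_short (c s : List Char) (hc : c.length = 3) (hs : s.length < 3) :
    ¬ c <:+: s := by
  intro h
  have := h.length_le
  omega

lemma codes_len3 (c : List Char) (hc : c ∈ eclCodes) : c.length = 3 := by
  fin_cases hc <;> rfl

-- B's scan finds exactly the strings having some code of eclCodes as an infix
lemma eclScan_iff (s : List Char) :
    eclScan s = true ↔ ∃ c ∈ eclCodes, c <:+: s := by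
  induction s with
  | nil =>
    show false = true ↔ _
    simp only [Bool.false_eq_true, false_iff]
    rintro ⟨c, hc, hinf⟩
    exact not_infix_short c [] (codes_len3 c hc) (by simp) hinf
  | cons c1 tl ih =>
    match tl with
    | [] =>
      show false = true ↔ _
      simp only [Bool.false_eq_true, false_iff]
      rintro ⟨c, hc, hinf⟩
      exact not_infix_short c [c1] (codes_len3 c hc) (by simp) hinf
    | [c2] =>
      show false = true ↔ _
      simp only [Bool.false_eq_true, false_iff]
      rintro ⟨c, hc, hinf⟩
      exact not_infix_short c [c1, c2] (codes_len3 c hc) (by simp) hinf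
    | c2 :: c3 :: r =>
      rw [eclScan_cons3]
      by_cases hmem : [c1, c2, c3] ∈ eclCodes
      · simp only [hmem, if_true, true_iff]
        exact ⟨[c1, c2, c3], hmem, ⟨[], r, by simp⟩⟩
      · simp only [hmem, if_false]
        rw [ih]
        constructor
        · rintro ⟨c, hc, hinf⟩
          exact ⟨c, hc, hinf.trans (List.suffix_cons c1 _).isInfix⟩
        · rintro ⟨c, hc, hinf⟩
          rcases (List.infix_cons_iff.mp hinf) with hpre | hinf'
          · exfalso
            rw [prefix3_iff c (codes_len3 c hc) c1 c2 c3 r] at hpre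
            exact hmem (hpre ▸ hc)
          · exact ⟨c, hc, hinf'⟩

-- A's loop succeeds exactly when some code of its list is found in the text
lemma eclLoop_iff (text : String) (l : List String) :
    eclLoop text l = true ↔ ∃ pp ∈ l, 0 ≤ PySem.Str.find text pp := by
  induction l with
  | nil => simp [eclLoop]
  | cons pp rest ih =>
    rw [eclLoop]
    split_ifs with h
    · rw [PySem.Str.find_eq] at h
      refine iff_of_true rfl ?_
      exact ⟨pp, List.mem_cons_self, by rw [PySem.Str.find_eq]; exact h⟩
    · simp only [ih, List.mem_cons]
      constructor
      · rintro ⟨q, hq, hf⟩; exact ⟨q, Or.inr hq, hf⟩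
      · rintro ⟨q, hq | hq, hf⟩
        · exact absurd (hq ▸ hf) h
        · exact ⟨q, hq, hf⟩

-- A finds exactly the strings having some code as an infix (find ≥ 0 ↔ infix)
lemma eclValidate_iff (text : String) :
    eclValidate text = true ↔ ∃ c ∈ eclCodes, c <:+: text.toList := by
  rw [eclValidate, eclLoop_iff]
  constructor
  · rintro ⟨pp, hpp, hf⟩
    rw [PySem.Str.find_nonneg_iff] at hf
    refine ⟨pp.toList, ?_, hf⟩
    fin_cases hpp <;> decide
  · rintro ⟨c, hc, hinf⟩
    fin_cases hc
    · exact ⟨"amb", by simp, (PySem.Str.find_nonneg_iff _ _).mpr hinf⟩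
    · exact ⟨"blu", by simp, (PySem.Str.find_nonneg_iff _ _).mpr hinf⟩
    · exact ⟨"brn", by simp, (PySem.Str.find_nonneg_iff _ _).mpr hinf⟩
    · exact ⟨"gry", by simp, (PySem.Str.find_nonneg_iff _ _).mpr hinf⟩
    · exact ⟨"grn", by simp, (PySem.Str.find_nonneg_iff _ _).mpr hinf⟩
    · exact ⟨"hzl", by simp, (PySem.Str.find_nonneg_iff _ _).mpr hinf⟩
    · exact ⟨"oth", by simp, (PySem.Str.find_nonneg_iff _ _).mpr hinf⟩

-- ===== VERDICT (by name: the statement is the Claim_ definition above) =====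
theorem eclValidate_spec : Claim_equal_eclValidate := by
  intro text _
  unfold Spec_eclValidate eclValidate_alt
  rcases hA : eclValidate text with _ | _
  · rcases hB : eclScan text.toList with _ | _
    · rfl
    · exact absurd ((eclValidate_iff text).mpr ((eclScan_iff _).mp hB)) (by simp [hA])
  · exact ((eclScan_iff _).mpr ((eclValidate_iff text).mp hA)).symm
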